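-- pv_equiv track=rewrite | github.com/choiire/NAND_WORK | nand_reset_blocks.py | get_two_plane_pairs_from_list
-- ===== SOURCE A (Python) =====
-- def get_two_plane_pairs_from_list(block_list: list) -> (list, list):
--     """주어진 블록 리스트에서 Two-plane 동작이 가능한 블록 쌍을 생성합니다."""
--     pairs = []
--
--     # 플레인별로 블록을 분류
--     plane0_blocks = sorted([b for b in block_list if (b >> 6) & 1 == 0])
--     plane1_blocks = sorted([b for b in block_list if (b >> 6) & 1 == 1])
--
--     # 각 플레인에서 동일한 인덱스의 블록들을 쌍으로 만들기
--     min_len = min(len(plane0_blocks), len(plane1_blocks))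
--     for i in range(min_len):
--         pairs.append((plane0_blocks[i], plane1_blocks[i]))
--
--     # 남은 블록들은 단일 블록으로 처리
--     remaining_blocks = plane0_blocks[min_len:] + plane1_blocks[min_len:]
--
--     return pairs, remaining_blocks
-- ===== SOURCE B (Python) =====
-- def get_two_plane_pairs_from_list(block_list: list) -> (list, list):
--     """Greedy online matching: scan blocks in ascending order, pairing each block
--     with the oldest still-unmatched block of the opposite plane; at most one of
--     the two waiting queues is ever nonempty, and it is the remainder."""
--     pairs, wait0, wait1 = [], [], []
--     for b in sorted(block_list):
--         if (b >> 6) & 1: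
--             if wait0:
--                 pairs.append((wait0.pop(0), b))
--             else:
--                 wait1.append(b)
--         else:
--             if wait1:
--                 pairs.append((b, wait1.pop(0)))
--             else:
--                 wait0.append(b)
--     return pairs, wait0 + wait1
-- ===== Notes on version B (the rewrite author's own statement) =====
-- stated objective: alternative
-- what changed: B replaces A's split-into-two-sorted-plane-lists + index loop + slice-concat remainder by a single-pass greedy online matching: scanning the globally sorted blocks once, each block is paired with the oldest unmatched block of the opposite plane via two waiting FIFO queues, and the surviving queue is the remainder.
import Mathlib
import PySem

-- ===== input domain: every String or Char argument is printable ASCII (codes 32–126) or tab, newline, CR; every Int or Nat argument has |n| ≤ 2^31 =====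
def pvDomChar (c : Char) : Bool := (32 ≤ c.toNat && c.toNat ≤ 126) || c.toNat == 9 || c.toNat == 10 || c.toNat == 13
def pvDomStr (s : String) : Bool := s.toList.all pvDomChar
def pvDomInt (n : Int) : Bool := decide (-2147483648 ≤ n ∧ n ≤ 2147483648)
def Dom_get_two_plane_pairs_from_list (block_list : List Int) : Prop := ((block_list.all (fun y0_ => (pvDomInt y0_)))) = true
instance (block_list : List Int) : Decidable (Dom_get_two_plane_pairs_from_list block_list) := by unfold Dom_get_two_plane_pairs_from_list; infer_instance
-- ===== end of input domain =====

-- B replaces A's per-plane sort + index loop + slice remainder by one sorted scan that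
-- greedily pairs each block with the oldest unmatched block of the opposite plane (objective: alternative).

-- ===== PORT A =====
-- Python's '(b >> 6) & 1' : core '>>>' is Python's arithmetic shift and Int.land is Python's '&' (exact, also on negatives)
def pvBit6 (b : Int) : Int := Int.land (b >>> (6 : Nat)) 1

def get_two_plane_pairs_from_list (block_list : List Int) : (List (Int × Int)) × List Int :=
  let plane0 := PySem.List.sorted (block_list.filter (fun b => pvBit6 b == 0)) (fun x => x) false
  let plane1 := PySem.List.sorted (block_list.filter (fun b => pvBit6 b == 1)) (fun x => x) false
  let minLen : Int := min (plane0.length : Int) (plane1.length : Int)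
  let pairs := (PySem.List.pyRange 0 minLen 1).foldl
    (fun acc i => acc ++ [(PySem.List.pyGetD plane0 i 0, PySem.List.pyGetD plane1 i 0)]) []
  let remaining := PySem.List.slice plane0 (some minLen) none ++ PySem.List.slice plane1 (some minLen) none
  (pairs, remaining)

-- ===== PORT B =====
-- the loop body of Source B: 'if wait0: pairs.append((wait0.pop(0), b)) else: wait1.append(b)' etc.
def pvGreedyStep (st : List (Int × Int) × List Int × List Int) (b : Int) :
    List (Int × Int) × List Int × List Int :=
  if pvBit6 b ≠ 0 then
    match st.2.1 with
    | m :: rest => (st.1 ++ [(m, b)], rest, st.2.2)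
    | [] => (st.1, st.2.1, st.2.2 ++ [b])
  else
    match st.2.2 with
    | m :: rest => (st.1 ++ [(b, m)], st.2.1, rest)
    | [] => (st.1, st.2.1 ++ [b], st.2.2)

def get_two_plane_pairs_from_list_alt (block_list : List Int) : (List (Int × Int)) × List Int :=
  let st := (PySem.List.sorted block_list (fun x => x) false).foldl pvGreedyStep ([], [], [])
  (st.1, st.2.1 ++ st.2.2)

-- ===== PRECONDITION & SPEC =====
def Spec_get_two_plane_pairs_from_list (block_list : List Int) (out : (List (Int × Int)) × List Int) : Prop := out = get_two_plane_pairs_from_list_alt block_list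
instance (block_list : List Int) (out : (List (Int × Int)) × List Int) : Decidable (Spec_get_two_plane_pairs_from_list block_list out) := by unfold Spec_get_two_plane_pairs_from_list; infer_instance

-- ===== CLAIM (what is proved, stated in full; the proofs are below) =====
def Claim_equal_get_two_plane_pairs_from_list : Prop := ∀ (block_list : List Int), Dom_get_two_plane_pairs_from_list block_list → Spec_get_two_plane_pairs_from_list block_list (get_two_plane_pairs_from_list block_list)

-- ===== LEMMAS AND PROOFS =====

theorem ldiff_one_le (m : Nat) : Nat.ldiff 1 m ≤ 1 := by
  show Nat.bitwise _ 1 m ≤ 1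
  rw [Nat.bitwise]
  have h0 : ∀ k, Nat.bitwise (fun a b => a && !b) 0 k = 0 := by
    intro k; rw [Nat.bitwise]; simp
  split_ifs <;> simp_all <;> split <;> omega

-- '(b >> 6) & 1' is 0 or 1
theorem pvBit6_cases (b : Int) : pvBit6 b = 0 ∨ pvBit6 b = 1 := by
  unfold pvBit6
  rcases b >>> (6 : Nat) with m | m
  · show (↑(m &&& 1) : Int) = 0 ∨ (↑(m &&& 1) : Int) = 1
    have : m &&& 1 ≤ 1 := Nat.and_le_right
    omega
  · show (↑(Nat.ldiff 1 m) : Int) = 0 ∨ (↑(Nat.ldiff 1 m) : Int) = 1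
    have := ldiff_one_le m
    omega

-- sorting a filtered list = filtering the sorted list (identity key)
theorem sorted_filter_comm (p : Int → Bool) (l : List Int) :
    PySem.List.sorted (l.filter p) (fun x => x) false
      = (PySem.List.sorted l (fun x => x) false).filter p := by
  apply PySem.List.sorted_id_eq_of_perm_of_pairwise
  · exact (PySem.List.sorted_perm l (fun x => x) false).filter p
  · exact List.Pairwise.sublist List.filter_sublist
      (PySem.List.sorted_pairwise l (fun x => x))

-- A's index loop over range(min(len xs, len ys)) builds zip xs ys
theorem range_fold_zip (xs ys : List Int) :
    (PySem.List.pyRange 0 (min (xs.length : Int) (ys.length : Int)) 1).foldl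
      (fun acc i => acc ++ [(PySem.List.pyGetD xs i 0, PySem.List.pyGetD ys i 0)]) []
      = xs.zip ys := by
  rw [PySem.List.foldl_append_singleton_eq_map, List.nil_append]
  have hmin : min (xs.length : Int) (ys.length : Int) = ((min xs.length ys.length : Nat) : Int) := by
    push_cast; rfl
  rw [hmin, PySem.List.pyRange_one]
  apply List.ext_getElem
  · simp [List.length_zip]; omega
  · intro i h1 h2
    simp only [List.getElem_map, List.getElem_range, List.getElem_zip, zero_add,
      PySem.List.pyGetD_natCast]
    have hx : i < xs.length := by simp [List.length_zip] at h2; omega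
    have hy : i < ys.length := by simp [List.length_zip] at h2; omega
    rw [List.getD_eq_getElem _ _ hx, List.getD_eq_getElem _ _ hy]

-- appending to the longer list does not change the zip
theorem zip_snoc_ge (l1 l2 : List Int) (x : Int) (h : l2.length ≤ l1.length) :
    (l1 ++ [x]).zip l2 = l1.zip l2 := by
  apply List.ext_getElem
  · simp; omega
  · intro i h1 h2
    have hi : i < l1.length := by simp at h2; omega
    simp [List.getElem_zip, List.getElem_append_left, hi]

theorem zip_snoc_ge_right (l1 l2 : List Int) (x : Int) (h : l1.length ≤ l2.length) :
    l1.zip (l2 ++ [x]) = l1.zip l2 := by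
  apply List.ext_getElem
  · simp; omega
  · intro i h1 h2
    have hi : i < l2.length := by simp at h2; omega
    simp [List.getElem_zip, List.getElem_append_left, hi]

-- appending to the shorter list extends the zip by one pair
theorem zip_snoc_lt_left (l1 l2 : List Int) (x : Int) (h : l1.length < l2.length) :
    (l1 ++ [x]).zip l2 = l1.zip l2 ++ [(x, l2[l1.length])] := by
  induction l1 generalizing l2 with
  | nil =>
    cases l2 with
    | nil => simp at h
    | cons y t => simp
  | cons a l1 ih =>
    cases l2 with
    | nil => simp at h
    | cons y t =>
      have ht : l1.length < t.length := by simp at h; omega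
      simp [ih t ht]

theorem zip_snoc_lt_right (l1 l2 : List Int) (x : Int) (h : l2.length < l1.length) :
    l1.zip (l2 ++ [x]) = l1.zip l2 ++ [(l1[l2.length], x)] := by
  induction l1 generalizing l2 with
  | nil => simp at h
  | cons a l1 ih =>
    cases l2 with
    | nil => simp
    | cons y t =>
      have ht : t.length < l1.length := by simp at h; omega
      simp [ih t ht]

-- B's greedy scan invariant: after processing s, the state is determined by the two plane
-- subsequences of the processed prefix (pairs = their zip, queues = the one-sided leftovers)
theorem greedy_fold (s : List Int) (f0 f1 : List Int) :
    s.foldl pvGreedyStep (f0.zip f1, f0.drop f1.length, f1.drop f0.length)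
      = ((f0 ++ s.filter (fun b => pvBit6 b == 0)).zip (f1 ++ s.filter (fun b => pvBit6 b == 1)),
         (f0 ++ s.filter (fun b => pvBit6 b == 0)).drop (f1 ++ s.filter (fun b => pvBit6 b == 1)).length,
         (f1 ++ s.filter (fun b => pvBit6 b == 1)).drop (f0 ++ s.filter (fun b => pvBit6 b == 0)).length) := by
  induction s generalizing f0 f1 with
  | nil => simp
  | cons x t ih =>
    rw [List.foldl_cons]
    rcases pvBit6_cases x with h | h
    · -- x belongs to plane 0
      have hstep : pvGreedyStep (f0.zip f1, f0.drop f1.length, f1.drop f0.length) x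
          = ((f0 ++ [x]).zip f1, (f0 ++ [x]).drop f1.length, f1.drop (f0 ++ [x]).length) := by
        unfold pvGreedyStep
        rw [if_neg (by simp [h])]
        rcases Nat.lt_or_ge f0.length f1.length with hlt | hge
        · rw [List.drop_eq_getElem_cons hlt]
          simp only [Prod.mk.injEq]
          refine ⟨?_, ?_, ?_⟩
          · exact (zip_snoc_lt_left _ _ _ hlt).symm
          · rw [List.drop_eq_nil_of_le (le_of_lt hlt),
              List.drop_eq_nil_of_le (by simp; omega)]
          · simp
        · rw [List.drop_eq_nil_of_le hge]
          simp only [Prod.mk.injEq]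
          refine ⟨?_, ?_, ?_⟩
          · exact (zip_snoc_ge _ _ _ hge).symm
          · rw [List.drop_append_of_le_length hge]
          · rw [List.drop_eq_nil_of_le (by simp; omega)]
      rw [hstep, ih (f0 ++ [x]) f1]
      simp [h, List.append_assoc]
    · -- x belongs to plane 1
      have hstep : pvGreedyStep (f0.zip f1, f0.drop f1.length, f1.drop f0.length) x
          = (f0.zip (f1 ++ [x]), f0.drop (f1 ++ [x]).length, (f1 ++ [x]).drop f0.length) := by
        unfold pvGreedyStep
        rw [if_pos (by simp [h])]
        rcases Nat.lt_or_ge f1.length f0.length with hlt | hge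
        · rw [List.drop_eq_getElem_cons hlt]
          simp only [Prod.mk.injEq]
          refine ⟨?_, ?_, ?_⟩
          · exact (zip_snoc_lt_right _ _ _ hlt).symm
          · simp
          · rw [List.drop_eq_nil_of_le (le_of_lt hlt),
              List.drop_eq_nil_of_le (by simp; omega)]
        · rw [List.drop_eq_nil_of_le hge]
          simp only [Prod.mk.injEq]
          refine ⟨?_, ?_, ?_⟩
          · exact (zip_snoc_ge_right _ _ _ hge).symm
          · rw [List.drop_eq_nil_of_le (by simp; omega)]
          · rw [List.drop_append_of_le_length hge]
      rw [hstep, ih f0 (f1 ++ [x])]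
      simp [h, List.append_assoc]

-- dropping the other list's length = dropping the min of the two lengths
theorem drop_len_min (l1 l2 : List Int) : l1.drop l2.length = l1.drop (min l1.length l2.length) := by
  rcases le_total l2.length l1.length with h | h
  · rw [min_eq_right h]
  · rw [List.drop_eq_nil_of_le h, List.drop_eq_nil_of_le (by omega)]

-- ===== VERDICT (by name: the statement is the Claim_ definition above) =====
theorem get_two_plane_pairs_from_list_spec : Claim_equal_get_two_plane_pairs_from_list := by
  intro block_list _
  unfold Spec_get_two_plane_pairs_from_list
  have hfold := greedy_fold (PySem.List.sorted block_list (fun x => x) false) [] []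
  simp only [List.zip_nil_left, List.length_nil, List.drop_nil, List.nil_append] at hfold
  simp only [get_two_plane_pairs_from_list, get_two_plane_pairs_from_list_alt]
  rw [hfold, ← sorted_filter_comm, ← sorted_filter_comm]
  set p0 := PySem.List.sorted (block_list.filter (fun b => pvBit6 b == 0)) (fun x => x) false with hp0
  set p1 := PySem.List.sorted (block_list.filter (fun b => pvBit6 b == 1)) (fun x => x) false with hp1
  have hmin : min (p0.length : Int) (p1.length : Int) = ((min p0.length p1.length : Nat) : Int) := by
    push_cast; rfl
  rw [range_fold_zip, hmin, PySem.List.slice_from_natCast, PySem.List.slice_from_natCast,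
    ← drop_len_min, min_comm, ← drop_len_min]
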